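-- pv_equiv track=rewrite | github.com/ngocyen3006/read-algorithm-jeff-erickson | 00_introduction/fibonacciMultiply.py | fibonacciMultiply
-- ===== SOURCE A (Python) =====
-- def fibonacciMultiply(x, y):
--     hold = 0
--     z = []
--     for k in range(len(x) + len(y)):
--         for i in range(0, k + 1):
--             for j in range(0, k + 1):
--                 if i + j == k:
--                     try:
--                         hold += x[i] * y[j]
--                     except IndexError:
--                         continue
--
--         z.append(hold % 10)
--         hold = hold // 10
--     return z
-- ===== SOURCE B (Python) =====
-- def fibonacciMultiply(x, y):
--     hold = 0
--     z = []
--     for k in range(len(x) + len(y)):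
--         lo = max(0, k - len(y) + 1)
--         hi = min(k + 1, len(x))
--         for i in range(lo, hi):
--             hold += x[i] * y[k - i]
--         z.append(hold % 10)
--         hold = hold // 10
--     return z
-- ===== Notes on version B (the rewrite author's own statement) =====
-- stated objective: faster
-- what changed: B replaces A's nested i,j scan over all (k+1)^2 pairs (with try/except for out-of-range indices) by a single inner loop over j = k - i with explicit index bounds lo = max(0, k-len(y)+1), hi = min(k+1, len(x)), so only in-range index pairs with i+j=k are visited.
import Mathlib
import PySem

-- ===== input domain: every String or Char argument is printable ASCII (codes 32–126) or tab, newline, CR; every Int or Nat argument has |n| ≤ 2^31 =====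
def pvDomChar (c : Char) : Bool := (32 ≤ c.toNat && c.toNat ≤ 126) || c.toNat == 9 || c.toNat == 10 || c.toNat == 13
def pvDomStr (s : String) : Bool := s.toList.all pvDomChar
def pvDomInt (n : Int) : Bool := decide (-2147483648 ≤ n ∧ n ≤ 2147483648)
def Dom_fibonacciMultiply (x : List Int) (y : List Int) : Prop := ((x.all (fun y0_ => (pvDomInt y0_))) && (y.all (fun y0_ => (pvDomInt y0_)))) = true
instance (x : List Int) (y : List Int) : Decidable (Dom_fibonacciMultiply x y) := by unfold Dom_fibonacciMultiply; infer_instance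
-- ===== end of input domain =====

-- B computes each convolution coefficient with a single bounded inner loop (j = k - i) instead of
-- A's scan of all (i, j) pairs with exception-guarded indexing; objective: faster.

-- ===== PORT A =====
def fibonacciMultiply (x : List Int) (y : List Int) : List Int :=
  ((PySem.List.pyRange 0 ((x.length : Int) + (y.length : Int)) 1).foldl
    (fun (s : Int × List Int) k =>
      let hold := (PySem.List.pyRange 0 (k + 1) 1).foldl
        (fun h i => (PySem.List.pyRange 0 (k + 1) 1).foldl
          (fun h j =>
            if i + j = k then
              -- try: hold += x[i] * y[j]  except IndexError: continue
              match PySem.List.pyGet? x i, PySem.List.pyGet? y j with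
              | some xi, some yj => h + xi * yj
              | _, _ => h
            else h) h) s.1
      (PySem.Int.floordiv hold 10, s.2 ++ [PySem.Int.mod hold 10]))
    (0, [])).2

-- ===== PORT B =====
def fibonacciMultiply_alt (x : List Int) (y : List Int) : List Int :=
  ((PySem.List.pyRange 0 ((x.length : Int) + (y.length : Int)) 1).foldl
    (fun (s : Int × List Int) k =>
      let lo := max 0 (k - (y.length : Int) + 1)
      let hi := min (k + 1) (x.length : Int)
      let hold := (PySem.List.pyRange lo hi 1).foldl
        -- indices i and k - i are in range by the choice of lo/hi, so the total pyGetD is exact here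
        (fun h i => h + PySem.List.pyGetD x i 0 * PySem.List.pyGetD y (k - i) 0) s.1
      (PySem.Int.floordiv hold 10, s.2 ++ [PySem.Int.mod hold 10]))
    (0, [])).2

-- ===== PRECONDITION & SPEC =====
def Spec_fibonacciMultiply (x : List Int) (y : List Int) (out : List Int) : Prop := out = fibonacciMultiply_alt x y
instance (x : List Int) (y : List Int) (out : List Int) : Decidable (Spec_fibonacciMultiply x y out) := by unfold Spec_fibonacciMultiply; infer_instance

-- ===== CLAIM (what is proved, stated in full; the proofs are below) =====
def Claim_equal_fibonacciMultiply : Prop := ∀ (x : List Int) (y : List Int), Dom_fibonacciMultiply x y → Spec_fibonacciMultiply x y (fibonacciMultiply x y)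

-- ===== LEMMAS AND PROOFS =====

-- the contribution of index i to coefficient k in A (0 when either index is out of range)
def pvTA (x y : List Int) (k i : Int) : Int :=
  match PySem.List.pyGet? x i, PySem.List.pyGet? y (k - i) with
  | some xi, some yj => xi * yj
  | _, _ => 0

lemma pv_sum_single (a b j0 : Int) (c : Int) (h1 : a ≤ j0) (h2 : j0 < b) :
    ((PySem.List.pyRange a b 1).map (fun j => if j = j0 then c else 0)).sum = c := by
  rw [PySem.List.pyRange_one_append a j0 b h1 (by omega), PySem.List.pyRange_one_cons h2]
  simp only [List.map_append, List.sum_append, List.map_cons, List.sum_cons]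
  rw [List.sum_eq_zero, List.sum_eq_zero]
  · simp
  all_goals
    intro v hv
    simp only [List.mem_map] at hv
    obtain ⟨j, hj, rfl⟩ := hv
    have := (PySem.List.mem_pyRange_one).1 hj
    rw [if_neg (by omega)]

-- A's nested i, j loops for coefficient k add exactly the diagonal contributions pvTA
lemma pv_innerA_eq (x y : List Int) (k : Int) (h : Int) :
    (PySem.List.pyRange 0 (k + 1) 1).foldl
      (fun h i => (PySem.List.pyRange 0 (k + 1) 1).foldl
        (fun h j =>
          if i + j = k then
            match PySem.List.pyGet? x i, PySem.List.pyGet? y j with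
            | some xi, some yj => h + xi * yj
            | _, _ => h
          else h) h) h
    = h + ((PySem.List.pyRange 0 (k + 1) 1).map (pvTA x y k)).sum := by
  rw [PySem.List.foldl_congr_mem _ _ (fun h i => h + pvTA x y k i) h ?_]
  · exact PySem.List.foldl_add _ _ _
  · intro acc i hi
    have hi' := (PySem.List.mem_pyRange_one).1 hi
    rw [PySem.List.foldl_congr_mem _ _
          (fun h j => h + (if j = k - i then pvTA x y k i else 0)) acc ?_]
    · rw [PySem.List.foldl_add, pv_sum_single 0 (k + 1) (k - i) _ (by omega) (by omega)]
    · intro acc2 j hj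
      by_cases hij : i + j = k
      · have hji : j = k - i := by omega
        subst hji
        simp only [if_pos hij, pvTA]
        cases PySem.List.pyGet? x i <;> cases PySem.List.pyGet? y (k - i) <;> simp
      · simp only [if_neg hij]
        simp [show j ≠ k - i from by omega]

lemma pvTA_zero (x y : List Int) (k i : Int) (hi0 : 0 ≤ i) (hik : i ≤ k)
    (h : i < max 0 (k - (y.length : Int) + 1) ∨ min (k + 1) (x.length : Int) ≤ i) :
    pvTA x y k i = 0 := by
  unfold pvTA
  rcases h with h | h
  · have hy : PySem.List.pyGet? y (k - i) = none := by
      rw [PySem.List.pyGet?_eq_none_iff]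
      simp [PySem.Raise.InRange]; omega
    rw [hy]; cases PySem.List.pyGet? x i <;> rfl
  · have hx : PySem.List.pyGet? x i = none := by
      rw [PySem.List.pyGet?_eq_none_iff]
      simp [PySem.Raise.InRange]; omega
    rw [hx]

lemma pvTA_mid (x y : List Int) (k i : Int)
    (hlo : max 0 (k - (y.length : Int) + 1) ≤ i) (hhi : i < min (k + 1) (x.length : Int)) :
    pvTA x y k i = PySem.List.pyGetD x i 0 * PySem.List.pyGetD y (k - i) 0 := by
  unfold pvTA
  rw [PySem.List.pyGet?_eq_some_getElem x (by omega) (by simp at hhi ⊢; omega),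
      PySem.List.pyGet?_eq_some_getElem y (i := k - i) (by omega) (by simp at hlo ⊢; omega),
      PySem.List.pyGetD_eq_getElem x 0 (by omega) (by simp at hhi ⊢; omega),
      PySem.List.pyGetD_eq_getElem y (i := k - i) 0 (by omega) (by simp at hlo ⊢; omega)]

-- A's sum of all diagonal contributions equals B's sum over exactly the in-range indices
lemma pv_sums_eq (x y : List Int) (k : Int) :
    ((PySem.List.pyRange 0 (k + 1) 1).map (pvTA x y k)).sum
    = ((PySem.List.pyRange (max 0 (k - (y.length : Int) + 1)) (min (k + 1) (x.length : Int)) 1).map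
        (fun i => PySem.List.pyGetD x i 0 * PySem.List.pyGetD y (k - i) 0)).sum := by
  set lo := max 0 (k - (y.length : Int) + 1) with hlo
  set hi := min (k + 1) (x.length : Int) with hhi
  by_cases hle : lo ≤ hi
  · rw [PySem.List.pyRange_one_append 0 lo (k + 1) (by omega) (by omega),
        PySem.List.pyRange_one_append lo hi (k + 1) hle (by omega)]
    simp only [List.map_append, List.sum_append]
    rw [List.sum_eq_zero, List.sum_eq_zero (l := (List.map (pvTA x y k) (PySem.List.pyRange hi (k+1) 1)))]
    · rw [zero_add, add_zero]
      congr 1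
      apply List.map_congr_left
      intro i hi'
      have := (PySem.List.mem_pyRange_one).1 hi'
      exact pvTA_mid x y k i this.1 this.2
    all_goals
      intro v hv
      simp only [List.mem_map] at hv
      obtain ⟨i, hi', rfl⟩ := hv
      have := (PySem.List.mem_pyRange_one).1 hi'
      apply pvTA_zero x y k i (by omega) (by omega) (by omega)
  · rw [PySem.List.pyRange_one_eq_nil (a := lo) (b := hi) (by omega), List.map_nil, List.sum_nil]
    apply List.sum_eq_zero
    intro v hv
    simp only [List.mem_map] at hv
    obtain ⟨i, hi', rfl⟩ := hv
    have := (PySem.List.mem_pyRange_one).1 hi'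
    apply pvTA_zero x y k i (by omega) (by omega) (by omega)

-- ===== VERDICT (by name: the statement is the Claim_ definition above) =====
theorem fibonacciMultiply_spec : Claim_equal_fibonacciMultiply := by
  intro x y _
  unfold Spec_fibonacciMultiply fibonacciMultiply fibonacciMultiply_alt
  congr 1
  apply PySem.List.foldl_congr_mem
  intro s k _
  simp only
  rw [pv_innerA_eq x y k, PySem.List.foldl_add, pv_sums_eq x y k]
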